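-- pv_equiv track=rewrite | github.com/korayakan/ba | module/data.py | combine_predicted_tags
-- ===== SOURCE A (Python) =====
-- def combine_predicted_tags(texts, tags):
--     company = ''
--     date = ''
--     address = ''
--     total = ''
--
--     for i in range(len(tags)):
--         if tags[i] == 1 and not company.endswith(texts[i]):
--             company += ' ' + texts[i]
--         if tags[i] == 2 and not date.endswith(texts[i]):
--             date += ' ' + texts[i]
--         if tags[i] == 3 and not address.endswith(texts[i]):
--             address += ' ' + texts[i]
--         if tags[i] == 4 and not total.endswith(texts[i]):
--             total += ' ' + texts[i]
--
--     return {'company': company.strip(), 'date': date.strip(), 'address': address.strip(), 'total': total.strip()}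
-- ===== SOURCE B (Python) =====
-- def combine_predicted_tags(texts, tags):
--     # Two-phase: group texts by tag first, then join each group with the
--     # same suffix-dedup rule.
--     def join(items):
--         acc = ''
--         for text in items:
--             if not acc.endswith(text):
--                 acc = acc + ' ' + text
--         return acc.strip()
--
--     pairs = list(zip(texts, tags))
--     return {
--         'company': join([t for t, g in pairs if g == 1]),
--         'date': join([t for t, g in pairs if g == 2]),
--         'address': join([t for t, g in pairs if g == 3]),
--         'total': join([t for t, g in pairs if g == 4]),
--     }
-- ===== Notes on version B (the rewrite author's own statement) =====
-- stated objective: alternative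
-- what changed: Replaces the interleaved four-branch single indexed loop with a group-then-process decomposition: collect the texts of each tag 1..4 from zip(texts, tags), then join each group separately with the same endswith-dedup rule.
import Mathlib
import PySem

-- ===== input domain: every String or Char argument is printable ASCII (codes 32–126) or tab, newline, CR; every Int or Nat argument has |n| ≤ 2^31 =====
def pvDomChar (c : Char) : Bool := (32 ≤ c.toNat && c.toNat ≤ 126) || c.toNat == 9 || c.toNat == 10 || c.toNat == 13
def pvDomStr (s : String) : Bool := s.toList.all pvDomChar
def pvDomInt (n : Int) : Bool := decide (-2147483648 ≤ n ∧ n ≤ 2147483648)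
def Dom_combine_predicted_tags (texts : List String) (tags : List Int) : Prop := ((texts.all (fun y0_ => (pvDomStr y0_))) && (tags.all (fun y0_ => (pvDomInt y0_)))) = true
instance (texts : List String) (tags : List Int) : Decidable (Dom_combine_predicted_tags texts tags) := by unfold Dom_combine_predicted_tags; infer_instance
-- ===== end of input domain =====

-- B replaces A's interleaved four-branch indexed loop by a group-then-process
-- decomposition (collect each tag's texts from zip, then join each group); same cost.


-- ===== PORT A =====
-- the body of A's loop: update the four accumulators from tag tg and text tx
def pvStep (s : String × String × String × String) (tg : Int) (tx : String) :
    String × String × String × String :=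
  let c := if tg = 1 ∧ ¬ PySem.Str.endswith s.1 tx = true then s.1 ++ " " ++ tx else s.1
  let d := if tg = 2 ∧ ¬ PySem.Str.endswith s.2.1 tx = true then s.2.1 ++ " " ++ tx else s.2.1
  let a := if tg = 3 ∧ ¬ PySem.Str.endswith s.2.2.1 tx = true then s.2.2.1 ++ " " ++ tx else s.2.2.1
  let t := if tg = 4 ∧ ¬ PySem.Str.endswith s.2.2.2 tx = true then s.2.2.2 ++ " " ++ tx else s.2.2.2
  (c, d, a, t)

def combine_predicted_tags (texts : List String) (tags : List Int) : List (String × String) :=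
  -- for i in range(len(tags)): … (texts[i] is in range under Pre_; pyGetD "" elsewhere)
  let fin := (PySem.List.pyRange 0 (tags.length : Int) 1).foldl
    (fun s i => pvStep s (PySem.List.pyGetD tags i 0) (PySem.List.pyGetD texts i ""))
    ("", "", "", "")
  [("company", PySem.Str.strip fin.1), ("date", PySem.Str.strip fin.2.1),
   ("address", PySem.Str.strip fin.2.2.1), ("total", PySem.Str.strip fin.2.2.2)]

-- ===== PORT B =====
-- the join-loop body of B: append ' ' + text unless acc already ends with it
def pvJStep (acc tx : String) : String :=
  if ¬ PySem.Str.endswith acc tx = true then acc ++ " " ++ tx else acc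

-- join(items): running string with the endswith-dedup check, then strip
def pvJoin (items : List String) : String :=
  PySem.Str.strip (items.foldl pvJStep "")

def combine_predicted_tags_alt (texts : List String) (tags : List Int) : List (String × String) :=
  let pairs := texts.zip tags
  [("company", pvJoin ((pairs.filter (fun p => p.2 == 1)).map (·.1))),
   ("date",    pvJoin ((pairs.filter (fun p => p.2 == 2)).map (·.1))),
   ("address", pvJoin ((pairs.filter (fun p => p.2 == 3)).map (·.1))),
   ("total",   pvJoin ((pairs.filter (fun p => p.2 == 4)).map (·.1)))]

-- ===== PRECONDITION & SPEC =====
-- Pre_ excludes exactly the inputs where A raises IndexError: some index i with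
-- tags[i] in 1..4 but i >= len(texts) (texts[i] is then accessed).
def Pre_combine_predicted_tags (texts : List String) (tags : List Int) : Prop :=
  ∀ k : Nat, k < tags.length →
    (tags.getD k 0 = 1 ∨ tags.getD k 0 = 2 ∨ tags.getD k 0 = 3 ∨ tags.getD k 0 = 4) →
    k < texts.length
instance (texts : List String) (tags : List Int) : Decidable (Pre_combine_predicted_tags texts tags) := by unfold Pre_combine_predicted_tags; infer_instance

def pvWitness_combine_predicted_tags : List String × List Int :=
  (["acme", "inc", "12.50"], [1, 1, 4])

def Spec_combine_predicted_tags (texts : List String) (tags : List Int) (out : List (String × String)) : Prop := out = combine_predicted_tags_alt texts tags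
instance (texts : List String) (tags : List Int) (out : List (String × String)) : Decidable (Spec_combine_predicted_tags texts tags out) := by unfold Spec_combine_predicted_tags; infer_instance

-- ===== CLAIM (what is proved, stated in full; the proofs are below) =====
def Claim_equal_combine_predicted_tags : Prop := ∀ (texts : List String) (tags : List Int), Dom_combine_predicted_tags texts tags → Pre_combine_predicted_tags texts tags → Spec_combine_predicted_tags texts tags (combine_predicted_tags texts tags)


-- ===== LEMMAS AND PROOFS =====

-- a step whose tag is outside 1..4 leaves the state unchanged
lemma pvStep_skip (s : String × String × String × String) (tg : Int) (tx : String)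
    (h : ¬ (tg = 1 ∨ tg = 2 ∨ tg = 3 ∨ tg = 4)) : pvStep s tg tx = s := by
  simp only [not_or] at h
  obtain ⟨h1, h2, h3, h4⟩ := h
  simp [pvStep, h1, h2, h3, h4]

-- A's indexed loop equals the fold of pvStep over texts.zip tags (under Pre_)
lemma fold_idx_eq_zip (texts : List String) (tags : List Int)
    (s : String × String × String × String)
    (hpre : Pre_combine_predicted_tags texts tags) :
    (PySem.List.pyRange 0 (tags.length : Int) 1).foldl
      (fun s i => pvStep s (PySem.List.pyGetD tags i 0) (PySem.List.pyGetD texts i "")) s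
    = (texts.zip tags).foldl (fun s p => pvStep s p.2 p.1) s := by
  rw [PySem.List.pyRange_zero_nat, List.foldl_map]
  simp only [PySem.List.pyGetD_natCast]
  induction tags generalizing texts s with
  | nil => simp [List.zip_nil_right]
  | cons t ts ih =>
    rw [List.length_cons, List.range_succ_eq_map, List.foldl_cons, List.foldl_map]
    simp only [List.getD_cons_succ, List.getD_cons_zero, Nat.succ_eq_add_one]
    have hpre' : Pre_combine_predicted_tags texts.tail ts := by
      intro k hk hmem
      have := hpre (k + 1) (by simpa using Nat.succ_lt_succ hk)
        (by simpa using hmem)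
      cases texts with
      | nil => simp at this
      | cons x xs => simpa using Nat.lt_of_succ_lt_succ (by simpa using this)
    cases texts with
    | nil =>
      have ht : ¬ (t = 1 ∨ t = 2 ∨ t = 3 ∨ t = 4) := by
        intro hmem
        exact absurd (hpre 0 (by simp) (by simpa using hmem)) (by simp)
      rw [pvStep_skip _ _ _ ht]
      have := ih [] s hpre'
      simpa [List.zip_nil_right] using this
    | cons x xs =>
      have := ih xs (pvStep s t x) hpre'
      simpa using this

-- folding pvStep over a pair list splits into the four per-tag join folds
lemma fold_split (ps : List (String × Int)) (c d a t : String) :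
    ps.foldl (fun s p => pvStep s p.2 p.1) (c, d, a, t) =
      (((ps.filter (fun p => p.2 == 1)).map (·.1)).foldl pvJStep c,
       ((ps.filter (fun p => p.2 == 2)).map (·.1)).foldl pvJStep d,
       ((ps.filter (fun p => p.2 == 3)).map (·.1)).foldl pvJStep a,
       ((ps.filter (fun p => p.2 == 4)).map (·.1)).foldl pvJStep t) := by
  induction ps generalizing c d a t with
  | nil => simp
  | cons p ps ih =>
    obtain ⟨tx, tg⟩ := p
    by_cases h1 : tg = 1
    · subst h1
      rw [List.foldl_cons, show pvStep (c, d, a, t) (1 : Int) tx = (pvJStep c tx, d, a, t) by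
        simp [pvStep, pvJStep], ih]
      simp
    · by_cases h2 : tg = 2
      · subst h2
        rw [List.foldl_cons, show pvStep (c, d, a, t) (2 : Int) tx = (c, pvJStep d tx, a, t) by
          simp [pvStep, pvJStep], ih]
        simp
      · by_cases h3 : tg = 3
        · subst h3
          rw [List.foldl_cons, show pvStep (c, d, a, t) (3 : Int) tx = (c, d, pvJStep a tx, t) by
            simp [pvStep, pvJStep], ih]
          simp
        · by_cases h4 : tg = 4
          · subst h4
            rw [List.foldl_cons, show pvStep (c, d, a, t) (4 : Int) tx = (c, d, a, pvJStep t tx) by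
              simp [pvStep, pvJStep], ih]
            simp
          · rw [List.foldl_cons, pvStep_skip _ _ _ (by tauto), ih]
            simp [h1, h2, h3, h4]

-- ===== VERDICT (by name: the statement is the Claim_ definition above) =====
theorem combine_predicted_tags_spec : Claim_equal_combine_predicted_tags := by
  intro texts tags _ hpre
  unfold Spec_combine_predicted_tags combine_predicted_tags combine_predicted_tags_alt
  rw [fold_idx_eq_zip texts tags _ hpre, fold_split]
  simp [pvJoin]
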